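-- pv_equiv track=rewrite | github.com/ShlokC/mlScanner | grid_logic.py | filter_close_levels
-- ===== SOURCE A (Python) =====
-- def filter_close_levels(levels_dict, tolerance):
--     """Remove levels that are too close to each other, keeping the stronger one"""
--     if not levels_dict:
--         return {}
--
--     sorted_levels = sorted(levels_dict.items(), key=lambda x: x[1], reverse=True)
--     filtered = {}
--
--     for price, strength in sorted_levels:
--         # Check if this level is too close to an already selected level
--         is_too_close = False
--         for selected_price in filtered:
--             if abs(price - selected_price) <= tolerance:
--                 is_too_close = True
--                 break
--
--         if not is_too_close:
--             filtered[price] = strength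
--
--     return filtered
-- ===== SOURCE B (Python) =====
-- def filter_close_levels(levels_dict, tolerance):
--     """Remove levels that are too close to each other, keeping the stronger one.
--
--     Same result as the scan-all version: the already-selected prices are
--     kept in an ascending list and each candidate is checked against only its
--     two nearest neighbours, found by binary search."""
--     filtered = {}
--     kept = []  # selected prices, ascending
--     for price, strength in sorted(levels_dict.items(), key=lambda x: x[1], reverse=True):
--         # binary search: lo = first index with kept[lo] >= price
--         lo, hi = 0, len(kept)
--         while lo < hi:
--             mid = (lo + hi) // 2
--             if kept[mid] < price:
--                 lo = mid + 1
--             else: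
--                 hi = mid
--         if (lo > 0 and price - kept[lo - 1] <= tolerance) or \
--            (lo < len(kept) and kept[lo] - price <= tolerance):
--             continue
--         kept.insert(lo, price)
--         filtered[price] = strength
--     return filtered
-- ===== Notes on version B (the rewrite author's own statement) =====
-- stated objective: alternative
-- what changed: The O(n) inner scan over all already-selected prices is replaced by keeping the selected prices in a sorted list and binary-searching for the candidate's insertion point, comparing only the two nearest neighbours against the tolerance.
import Mathlib
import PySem

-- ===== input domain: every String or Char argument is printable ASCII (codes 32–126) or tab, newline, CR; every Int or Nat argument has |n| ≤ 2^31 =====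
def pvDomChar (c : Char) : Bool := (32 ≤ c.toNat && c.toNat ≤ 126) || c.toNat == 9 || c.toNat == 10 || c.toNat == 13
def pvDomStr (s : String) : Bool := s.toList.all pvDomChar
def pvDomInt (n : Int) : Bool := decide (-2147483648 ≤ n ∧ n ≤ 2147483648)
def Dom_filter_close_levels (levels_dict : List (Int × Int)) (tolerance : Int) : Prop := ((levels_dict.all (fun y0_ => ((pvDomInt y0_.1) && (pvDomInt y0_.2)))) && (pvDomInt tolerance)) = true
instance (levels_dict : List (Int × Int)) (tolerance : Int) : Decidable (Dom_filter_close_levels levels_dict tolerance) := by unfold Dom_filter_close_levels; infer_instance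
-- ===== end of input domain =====

-- B keeps the selected prices in an ascending list and binary-searches for each candidate's
-- insertion point, comparing only the two nearest neighbours instead of scanning every
-- selected price (objective: alternative algorithm, same observable result).


-- ===== PORT A =====
-- loop body of A: scan ALL already-selected prices ('for selected_price in filtered: … break'
-- is a short-circuited pure scan of the keys), then insert if none is within tolerance
def pvStepA (tolerance : Int) (filtered : PySem.Dict Int Int) (ps : Int × Int) : PySem.Dict Int Int :=
  let is_too_close := (PySem.Dict.keys filtered).any (fun sp => decide (|ps.1 - sp| ≤ tolerance))
  if is_too_close then filtered else filtered.insert ps.1 ps.2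

def filter_close_levels (levels_dict : List (Int × Int)) (tolerance : Int) : List (Int × Int) :=
  if levels_dict = [] then []
  else
    let sorted_levels := PySem.List.sorted levels_dict (fun x => x.2) true
    (sorted_levels.foldl (pvStepA tolerance) PySem.Dict.empty).items

-- ===== PORT B =====
-- the hand-written 'while lo < hi' binary search of Source B, step for step
-- (structural recursion on a fuel that bounds the remaining interval; hi - lo shrinks each turn)
def pvBisF (kept : List Int) (price : Int) : Nat → Nat → Nat → Nat
  | 0, lo, _ => lo
  | fuel + 1, lo, hi =>
    if lo < hi then
      let mid := (lo + hi) / 2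
      if kept.getD mid 0 < price then pvBisF kept price fuel (mid + 1) hi
      else pvBisF kept price fuel lo mid
    else lo

def pvBis (kept : List Int) (price : Int) (lo hi : Nat) : Nat :=
  pvBisF kept price (hi - lo) lo hi

-- loop body of B: compare only the two neighbours of the insertion point, then insert there
def pvStepB (tolerance : Int) (st : List Int × PySem.Dict Int Int) (ps : Int × Int) :
    List Int × PySem.Dict Int Int :=
  let kept := st.1
  let lo := pvBis kept ps.1 0 kept.length
  if (decide (0 < lo) && decide (ps.1 - kept.getD (lo - 1) 0 ≤ tolerance)) ||
     (decide (lo < kept.length) && decide (kept.getD lo 0 - ps.1 ≤ tolerance)) then st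
  else (kept.take lo ++ ps.1 :: kept.drop lo, st.2.insert ps.1 ps.2)

def filter_close_levels_alt (levels_dict : List (Int × Int)) (tolerance : Int) : List (Int × Int) :=
  (((PySem.List.sorted levels_dict (fun x => x.2) true).foldl (pvStepB tolerance)
      ([], PySem.Dict.empty)).2).items

-- ===== PRECONDITION & SPEC =====
def Spec_filter_close_levels (levels_dict : List (Int × Int)) (tolerance : Int) (out : List (Int × Int)) : Prop := out = filter_close_levels_alt levels_dict tolerance
instance (levels_dict : List (Int × Int)) (tolerance : Int) (out : List (Int × Int)) : Decidable (Spec_filter_close_levels levels_dict tolerance out) := by unfold Spec_filter_close_levels; infer_instance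

-- ===== CLAIM (what is proved, stated in full; the proofs are below) =====
def Claim_equal_filter_close_levels : Prop := ∀ (levels_dict : List (Int × Int)) (tolerance : Int), Dom_filter_close_levels levels_dict tolerance → Spec_filter_close_levels levels_dict tolerance (filter_close_levels levels_dict tolerance)

-- ===== LEMMAS AND PROOFS =====

-- monotone-indexing form of sortedness of the kept list
def PvSortedD (kept : List Int) : Prop :=
  ∀ i j : Nat, i ≤ j → j < kept.length → kept.getD i 0 ≤ kept.getD j 0

lemma pvBisF_spec (kept : List Int) (p : Int) (hs : PvSortedD kept) :
    ∀ (n lo hi : Nat), hi - lo ≤ n → lo ≤ hi → hi ≤ kept.length →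
    (∀ i, i < lo → kept.getD i 0 < p) →
    (∀ i, hi ≤ i → i < kept.length → p ≤ kept.getD i 0) →
    pvBisF kept p n lo hi ≤ kept.length ∧
    (∀ i, i < pvBisF kept p n lo hi → kept.getD i 0 < p) ∧
    (∀ i, pvBisF kept p n lo hi ≤ i → i < kept.length → p ≤ kept.getD i 0) := by
  intro n
  induction n with
  | zero =>
    intro lo hi hn hle hlen h3 h4
    have heq : lo = hi := by omega
    simp only [pvBisF]
    exact ⟨by omega, fun i h => h3 i h, fun i h1 h2 => h4 i (by omega) h2⟩
  | succ n ih =>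
    intro lo hi hn hle hlen h3 h4
    simp only [pvBisF]
    by_cases h : lo < hi
    · simp only [h, if_true]
      by_cases hm : kept.getD ((lo + hi) / 2) 0 < p
      · simp only [hm, if_true]
        refine ih ((lo + hi) / 2 + 1) hi (by omega) (by omega) hlen ?_ h4
        intro i hi2
        exact lt_of_le_of_lt (hs i ((lo + hi) / 2) (by omega) (by omega)) hm
      · simp only [hm, if_false]
        refine ih lo ((lo + hi) / 2) (by omega) (by omega) (by omega) h3 ?_
        intro i hge hlt
        exact le_trans (not_lt.mp hm) (hs ((lo + hi) / 2) i hge hlt)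
    · simp only [h, if_false]
      exact ⟨by omega, fun i hi2 => h3 i hi2, fun i h1 h2 => h4 i (by omega) h2⟩

lemma pvBis_spec (kept : List Int) (p : Int) (hs : PvSortedD kept) :
    pvBis kept p 0 kept.length ≤ kept.length ∧
    (∀ i, i < pvBis kept p 0 kept.length → kept.getD i 0 < p) ∧
    (∀ i, pvBis kept p 0 kept.length ≤ i → i < kept.length → p ≤ kept.getD i 0) :=
  pvBisF_spec kept p hs (kept.length - 0) 0 kept.length (by omega) (Nat.zero_le _) le_rfl
    (fun i h => absurd h (Nat.not_lt_zero i)) (fun i h1 h2 => absurd h2 (Nat.not_lt.mpr h1))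

-- the two-neighbour test of B equals the full scan of A, on a sorted kept list
lemma pvCheck_iff (kept : List Int) (p tol : Int) (hs : PvSortedD kept) :
    (((decide (0 < pvBis kept p 0 kept.length) &&
       decide (p - kept.getD (pvBis kept p 0 kept.length - 1) 0 ≤ tol)) ||
      (decide (pvBis kept p 0 kept.length < kept.length) &&
       decide (kept.getD (pvBis kept p 0 kept.length) 0 - p ≤ tol))) = true)
    ↔ ∃ x ∈ kept, |p - x| ≤ tol := by
  obtain ⟨hle, hlt, hge⟩ := pvBis_spec kept p hs
  set r := pvBis kept p 0 kept.length with hr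
  simp only [Bool.or_eq_true, Bool.and_eq_true, decide_eq_true_eq]
  constructor
  · rintro (⟨h0, hA⟩ | ⟨hrl, hB⟩)
    · have h1 : r - 1 < kept.length := by omega
      refine ⟨kept.getD (r - 1) 0, ?_, ?_⟩
      · rw [List.getD_eq_getElem _ _ h1]; exact List.getElem_mem h1
      · have h2 := hlt (r - 1) (by omega)
        rw [abs_of_nonneg (by linarith)]
        exact hA
    · refine ⟨kept.getD r 0, ?_, ?_⟩
      · rw [List.getD_eq_getElem _ _ hrl]; exact List.getElem_mem hrl
      · have h2 := hge r le_rfl hrl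
        rw [abs_of_nonpos (by linarith), neg_sub]
        exact hB
  · rintro ⟨x, hx, hxt⟩
    obtain ⟨i, hi, hix⟩ := List.mem_iff_getElem.mp hx
    have hgd : kept.getD i 0 = x := by rw [List.getD_eq_getElem _ _ hi, hix]
    by_cases hir : i < r
    · left
      have h2 := hlt i hir
      have h3 := hs i (r - 1) (by omega) (by omega)
      rw [abs_of_nonneg (by rw [hgd] at h2; linarith)] at hxt
      exact ⟨by omega, by rw [← hgd] at hxt; linarith⟩
    · right
      have h2 := hge i (by omega) hi
      have h3 := hs r i (by omega) hi
      rw [abs_of_nonpos (by rw [hgd] at h2; linarith)] at hxt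
      rw [neg_sub, ← hgd] at hxt
      exact ⟨by omega, by linarith⟩

lemma getD_ins (kept : List Int) (p : Int) (r : Nat) (hr : r ≤ kept.length) (i : Nat) :
    (kept.take r ++ p :: kept.drop r).getD i 0 =
      if i < r then kept.getD i 0 else if i = r then p else kept.getD (i - 1) 0 := by
  simp only [List.getD_eq_getElem?_getD]
  by_cases h1 : i < r
  · rw [List.getElem?_append_left (by simp; omega)]
    rw [List.getElem?_take_of_lt h1]
    simp [h1]
  · rw [List.getElem?_append_right (by simp; omega)]
    have hlen : (kept.take r).length = r := by simp; omega
    rw [hlen]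
    by_cases h2 : i = r
    · simp [h2]
    · have he : i - r = (i - r - 1) + 1 := by omega
      rw [he]
      simp only [List.getElem?_cons_succ, List.getElem?_drop]
      have he2 : r + (i - r - 1) = i - 1 := by omega
      rw [he2]
      simp [h1, h2]

lemma pvInsert_sorted (kept : List Int) (p : Int) (hs : PvSortedD kept)
    (r : Nat) (hr : r ≤ kept.length)
    (hlt : ∀ i, i < r → kept.getD i 0 < p)
    (hge : ∀ i, r ≤ i → i < kept.length → p ≤ kept.getD i 0) :
    PvSortedD (kept.take r ++ p :: kept.drop r) := by
  intro i j hij hj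
  have hlen : (kept.take r ++ p :: kept.drop r).length = kept.length + 1 := by simp
  rw [hlen] at hj
  rw [getD_ins kept p r hr i, getD_ins kept p r hr j]
  split_ifs <;>
    first
      | omega
      | exact le_rfl
      | exact hs i j hij (by omega)
      | exact le_of_lt (hlt i (by omega))
      | exact le_trans (le_of_lt (hlt i (by omega))) (hge (j - 1) (by omega) (by omega))
      | exact hge (j - 1) (by omega) (by omega)
      | exact hs (i - 1) (j - 1) (by omega) (by omega)

lemma pvInsert_mem (kept : List Int) (p x : Int) (r : Nat) :
    x ∈ kept.take r ++ p :: kept.drop r ↔ x = p ∨ x ∈ kept := by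
  simp only [List.mem_append, List.mem_cons]
  constructor
  · rintro (h | h | h)
    · exact Or.inr (List.mem_of_mem_take h)
    · exact Or.inl h
    · exact Or.inr (List.mem_of_mem_drop h)
  · rintro (h | h)
    · exact Or.inr (Or.inl h)
    · rcases List.mem_append.mp (by rw [List.take_append_drop r kept]; exact h :
        x ∈ kept.take r ++ kept.drop r) with h' | h'
      · exact Or.inl h'
      · exact Or.inr (Or.inr h')

lemma pv_fold_eq (tolerance : Int) (l : List (Int × Int)) :
    ∀ (kept : List Int) (d : PySem.Dict Int Int),
    PvSortedD kept → (∀ x, x ∈ kept ↔ x ∈ d.keys) →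
    l.foldl (pvStepA tolerance) d = (l.foldl (pvStepB tolerance) (kept, d)).2 := by
  induction l with
  | nil => intro kept d _ _; rfl
  | cons ps l ih =>
    intro kept d hs hmem
    simp only [List.foldl_cons]
    obtain ⟨hle, hlt, hge⟩ := pvBis_spec kept ps.1 hs
    have hiffA : ((d.keys.any fun sp => decide (|ps.1 - sp| ≤ tolerance)) = true)
        ↔ ∃ x ∈ kept, |ps.1 - x| ≤ tolerance := by
      simp only [List.any_eq_true, decide_eq_true_eq]
      exact ⟨fun ⟨x, hx, h⟩ => ⟨x, (hmem x).mpr hx, h⟩,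
             fun ⟨x, hx, h⟩ => ⟨x, (hmem x).mp hx, h⟩⟩
    have hiffB := pvCheck_iff kept ps.1 tolerance hs
    by_cases hc : ∃ x ∈ kept, |ps.1 - x| ≤ tolerance
    · have hA : pvStepA tolerance d ps = d := by
        unfold pvStepA; rw [if_pos (hiffA.mpr hc)]
      have hB : pvStepB tolerance (kept, d) ps = (kept, d) := by
        unfold pvStepB; rw [if_pos (hiffB.mpr hc)]
      rw [hA, hB]
      exact ih kept d hs hmem
    · have hA : pvStepA tolerance d ps = d.insert ps.1 ps.2 := by
        unfold pvStepA
        rw [if_neg (fun h => hc (hiffA.mp h))]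
      have hB : pvStepB tolerance (kept, d) ps =
          (kept.take (pvBis kept ps.1 0 kept.length) ++
             ps.1 :: kept.drop (pvBis kept ps.1 0 kept.length), d.insert ps.1 ps.2) := by
        unfold pvStepB
        rw [if_neg (fun h => hc (hiffB.mp h))]
      rw [hA, hB]
      refine ih _ _ (pvInsert_sorted kept ps.1 hs _ hle hlt hge) ?_
      intro x
      rw [pvInsert_mem, PySem.Dict.mem_keys_insert]
      exact or_congr Iff.rfl (hmem x)

lemma pvSortedD_nil : PvSortedD [] := by
  intro i j _ hj
  simp at hj

-- ===== VERDICT (by name: the statement is the Claim_ definition above) =====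
theorem filter_close_levels_spec : Claim_equal_filter_close_levels := by
  intro levels_dict tolerance _
  unfold Spec_filter_close_levels filter_close_levels filter_close_levels_alt
  by_cases h : levels_dict = []
  · subst h; rfl
  · rw [if_neg h]
    exact congrArg PySem.Dict.items
      (pv_fold_eq tolerance (PySem.List.sorted levels_dict (fun x => x.2) true) [] PySem.Dict.empty
        pvSortedD_nil (fun x => by simp [PySem.Dict.keys_empty]))
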